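-- pv_equiv track=rewrite | github.com/quixadhal/PyRom | Rom24/pysrc/merc.py | read_flags
-- ===== SOURCE A (Python) =====
-- A = 1
--
-- aa = 1 << 27
--
-- def read_word(str, lower = True):
--     if not str:
--         return ("", "")
--     str = str.lstrip()
--     word = str.split()[0]
--     if word[0] == "'":
--         word = str[:str.find("'", 1)+1]
--     if lower:
--         word = word.lower()
--     str = str.lstrip()
--     str = str[len(word)+1:]
--     return (str, word.strip())
--
-- def read_flags(str):
--     if not str:
--         return (None, None)
--     str, w = read_word(str, False)
--     if w == '0' or w == 0:
--         return (str, 0)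
--     if w.isdigit():
--         return (str, int(w))
--     flags = 0
--
--     for c in w:
--         flag = 0
--         if 'A' <= c <= 'Z':
--             flag = A
--             while c != 'A':
--                 flag *= 2
--                 c = chr( ord(c)-1 )
--
--         elif 'a' <= c <= 'z':
--             flag = aa
--             while c != 'a':
--                 flag *= 2
--                 c = chr( ord(c)-1 )
--
--         flags += flag
--     return (str, flags)
-- ===== SOURCE B (Python) =====
-- def read_word(str, lower = True):
--     if not str:
--         return ("", "")
--     str = str.lstrip()
--     word = str.split()[0]
--     if word[0] == "'":
--         word = str[:str.find("'", 1)+1]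
--     if lower:
--         word = word.lower()
--     str = str.lstrip()
--     str = str[len(word)+1:]
--     return (str, word.strip())
--
-- def _char_flag(c):
--     if 'A' <= c <= 'Z':
--         return 1 << (ord(c) - ord('A'))
--     if 'a' <= c <= 'z':
--         return 1 << (27 + ord(c) - ord('a'))
--     return 0
--
-- def read_flags(str):
--     if not str:
--         return (None, None)
--     rest, w = read_word(str, False)
--     if w.isdigit():
--         return (rest, int(w))
--     return (rest, sum(map(_char_flag, w)))
-- ===== Notes on version B (the rewrite author's own statement) =====
-- stated objective: simpler
-- what changed: The inner while-loop computing each letter's flag by repeated doubling with character decrements is replaced by a closed-form bit shift by the letter's alphabet offset (plus 27 for lowercase), the per-word accumulation becomes a sum over mapped characters, and the redundant zero-word guard and dead int comparison are dropped since isdigit covers them.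
import Mathlib
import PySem

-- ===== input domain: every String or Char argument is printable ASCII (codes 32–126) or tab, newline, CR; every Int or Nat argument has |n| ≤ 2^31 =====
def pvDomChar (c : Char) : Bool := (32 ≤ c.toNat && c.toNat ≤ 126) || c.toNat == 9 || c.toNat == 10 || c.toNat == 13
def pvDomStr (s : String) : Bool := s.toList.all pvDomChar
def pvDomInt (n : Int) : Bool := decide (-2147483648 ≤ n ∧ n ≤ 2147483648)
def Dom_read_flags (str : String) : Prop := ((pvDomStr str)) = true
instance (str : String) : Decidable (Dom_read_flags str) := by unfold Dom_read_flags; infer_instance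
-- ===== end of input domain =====

-- B replaces A's per-character while-loop doubling with a direct bit-shift closed form
-- and drops the redundant `w == '0'` / dead `w == 0` guards (objective: simpler).


-- ===== PORT A =====
-- helper read_word (identical in Source A and Source B, shared by both ports);
-- none = the IndexError of `str.split()[0]` on a whitespace-only string
def read_word_port (str : String) (lower : Bool) : Option (String × String) :=
  if str == "" then some ("", "")
  else
    let s1 := PySem.Str.lstrip str
    match (PySem.Str.split₀ s1).head? with
    | none => none
    | some word0 =>
      let word1 :=
        if PySem.Str.pyGet? word0 0 = some '\'' then
          PySem.Str.slice s1 none (some (PySem.Str.findFrom s1 "'" 1 none + 1))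
        else word0
      let word2 := if lower then PySem.Str.lower word1 else word1
      let s2 := PySem.Str.lstrip s1
      let s3 := PySem.Str.slice s2 (some (PySem.Str.len word2 + 1)) none
      some (s3, PySem.Str.strip word2)

-- `while c != 'A': flag *= 2; c = chr(ord(c)-1)` — runs (ord c - ord 'A') times, doubling flag
def read_flags_dbl : Nat → Int → Int
  | 0, flag => flag
  | n + 1, flag => read_flags_dbl n (flag * 2)

def read_flags (str : String) : Option String × Option Int :=
  if str == "" then (none, none)
  else
    match read_word_port str false with
    | none => (none, none)   -- read_word raised (excluded by Pre_)
    | some (rest, w) =>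
      if w == "0" then (some rest, some 0)   -- `or w == 0` is dead: w is a str
      else if PySem.Str.strIsdigit w then (some rest, PySem.Int.ofStr? w)
      else
        (some rest, some (w.toList.foldl (fun flags c =>
          flags + (if 'A' ≤ c ∧ c ≤ 'Z' then read_flags_dbl (c.toNat - 65) 1
                   else if 'a' ≤ c ∧ c ≤ 'z' then read_flags_dbl (c.toNat - 97) 134217728
                   else 0)) 0))

-- ===== PORT B =====
def char_flag (c : Char) : Int :=
  if 'A' ≤ c ∧ c ≤ 'Z' then (1 : Int) <<< (c.toNat - 65)
  else if 'a' ≤ c ∧ c ≤ 'z' then (1 : Int) <<< (27 + c.toNat - 97)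
  else 0

def read_flags_alt (str : String) : Option String × Option Int :=
  if str == "" then (none, none)
  else
    match read_word_port str false with
    | none => (none, none)
    | some (rest, w) =>
      if PySem.Str.strIsdigit w then (some rest, PySem.Int.ofStr? w)
      else (some rest, some (w.toList.map char_flag).sum)

-- ===== PRECONDITION & SPEC =====
-- Pre_ excludes nonempty all-whitespace strings, on which A raises IndexError in str.split()[0].
def Pre_read_flags (str : String) : Prop := str = "" ∨ PySem.Str.strip str ≠ ""
instance (str : String) : Decidable (Pre_read_flags str) := by unfold Pre_read_flags; infer_instance
def pvWitness_read_flags : String := "AbZ 1"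

def Spec_read_flags (str : String) (out : Option String × Option Int) : Prop := out = read_flags_alt str
instance (str : String) (out : Option String × Option Int) : Decidable (Spec_read_flags str out) := by unfold Spec_read_flags; infer_instance

-- ===== CLAIM (what is proved, stated in full; the proofs are below) =====
def Claim_equal_read_flags : Prop := ∀ (str : String), Dom_read_flags str → Pre_read_flags str → Spec_read_flags str (read_flags str)

-- ===== LEMMAS AND PROOFS =====
theorem read_flags_dbl_eq (n : Nat) (f : Int) : read_flags_dbl n f = f * 2 ^ n := by
  induction n generalizing f with
  | zero => simp [read_flags_dbl]
  | succ n ih => rw [read_flags_dbl, ih]; ring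

theorem char_flag_eq (c : Char) :
    (if 'A' ≤ c ∧ c ≤ 'Z' then read_flags_dbl (c.toNat - 65) 1
     else if 'a' ≤ c ∧ c ≤ 'z' then read_flags_dbl (c.toNat - 97) 134217728
     else 0) = char_flag c := by
  unfold char_flag
  split_ifs with h1 h2
  · rw [read_flags_dbl_eq, Int.shiftLeft_eq]
  · rw [read_flags_dbl_eq, Int.shiftLeft_eq]
    have hc : 97 ≤ c.toNat := h2.1
    have : 27 + c.toNat - 97 = 27 + (c.toNat - 97) := by omega
    rw [this, pow_add]; norm_num
  · rfl

-- ===== VERDICT (by name: the statement is the Claim_ definition above) =====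
theorem read_flags_spec : Claim_equal_read_flags := by
  intro str _ _
  unfold Spec_read_flags read_flags read_flags_alt
  split
  · rfl
  · split
    · rfl
    · rename_i rest w _
      split_ifs with h0 hd hd
      · have hw : w = "0" := by simpa using h0
        subst hw
        have h2 : PySem.Int.ofStr? "0" = some 0 := by decide
        rw [h2]
      · have hw : w = "0" := by simpa using h0
        subst hw
        exact absurd (by decide) hd
      · rfl
      · rw [PySem.List.foldl_add w.toList (fun c =>
          (if 'A' ≤ c ∧ c ≤ 'Z' then read_flags_dbl (c.toNat - 65) 1
           else if 'a' ≤ c ∧ c ≤ 'z' then read_flags_dbl (c.toNat - 97) 134217728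
           else 0)) 0]
        simp only [char_flag_eq, zero_add]
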